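-- pv_equiv track=rewrite | github.com/wasef-c/EmoSpeech | DINAT/functionsV3.py | get_label_boundaries
-- ===== SOURCE A (Python) =====
-- from collections import OrderedDict
--
-- def get_label_boundaries(dataset, label_column="label"):
--     """
--     Given a sorted dataset, identify the start (inclusive)
--     and end (exclusive) indices for each label.
--     """
--     boundaries = OrderedDict()
--     current_label = None
--     start_idx = 0
--
--     # Because the dataset is sorted, we only record changes in label
--     for idx, example in enumerate(dataset):
--         label = example[label_column]
--         if current_label is None:
--             current_label = label
--             start_idx = idx
--         elif label != current_label:
--             # record the boundary for the old label
--             boundaries[current_label] = (start_idx, idx)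
--             # update current label
--             current_label = label
--             start_idx = idx
--
--     # The last label boundary
--     if current_label is not None:
--         boundaries[current_label] = (start_idx, len(dataset))
--
--     return boundaries
-- ===== SOURCE B (Python) =====
-- from collections import OrderedDict
--
-- def get_label_boundaries(dataset, label_column="label"):
--     """
--     Two-pointer run scan: extract the label of each row once, then for each
--     run find its end with an inner scan and record (start, end) directly.
--     """
--     labels = [example[label_column] for example in dataset]
--     boundaries = OrderedDict()
--     n = len(labels)
--     i = 0
--     while i < n:
--         j = i + 1
--         while j < n and labels[j] == labels[i]:
--             j += 1
--         boundaries[labels[i]] = (i, j)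
--         i = j
--     return boundaries
-- ===== Notes on version B (the rewrite author's own statement) =====
-- stated objective: alternative
-- what changed: Replaces A's current_label/start_idx state machine (which records a boundary only when the label changes and patches the last run after the loop) by a two-pointer run scanner: an outer loop positioned at each run start and an inner scan that finds the run end, inserting each (start, end) immediately with no None sentinel and no post-loop fixup.
import Mathlib
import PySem

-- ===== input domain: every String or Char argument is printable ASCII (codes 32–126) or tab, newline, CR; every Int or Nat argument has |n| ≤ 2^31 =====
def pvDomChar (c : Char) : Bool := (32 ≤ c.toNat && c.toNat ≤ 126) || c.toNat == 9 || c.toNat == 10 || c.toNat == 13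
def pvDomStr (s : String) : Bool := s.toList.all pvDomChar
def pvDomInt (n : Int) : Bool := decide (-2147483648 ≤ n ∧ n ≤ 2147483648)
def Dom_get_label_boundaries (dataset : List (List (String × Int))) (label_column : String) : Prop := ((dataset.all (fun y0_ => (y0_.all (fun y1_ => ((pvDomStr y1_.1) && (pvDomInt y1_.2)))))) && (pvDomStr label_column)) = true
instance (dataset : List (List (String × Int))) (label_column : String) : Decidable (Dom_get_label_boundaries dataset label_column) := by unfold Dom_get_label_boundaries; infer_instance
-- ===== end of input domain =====

-- B replaces A's current_label/start_idx state machine by a two-pointer run scan; objective: alternative (same O(n) cost).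

-- shared dict access: example[label_column], first match in the association list
-- (exact under Pre_, which excludes the KeyError case where no key matches)
def pvLookup (row : List (String × Int)) (k : String) : Option Int :=
  (row.find? (fun p => p.1 == k)).map (·.2)

-- ===== PORT A =====
-- the for loop over enumerate(dataset): state (boundaries, current_label, start_idx)
def pvLoopA (label_column : String) :
    List (List (String × Int)) → Int → PySem.Dict Int (Int × Int) → Option Int → Int →
    PySem.Dict Int (Int × Int) × Option Int × Int
  | [], _, b, cur, s => (b, cur, s)
  | ex :: rest, idx, b, cur, s =>
    let label := (pvLookup ex label_column).getD 0
    match cur with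
    | none => pvLoopA label_column rest (idx + 1) b (some label) idx
    | some c =>
      if label ≠ c then
        pvLoopA label_column rest (idx + 1) (b.insert c (s, idx)) (some label) idx
      else
        pvLoopA label_column rest (idx + 1) b (some c) s

def get_label_boundaries (dataset : List (List (String × Int))) (label_column : String) : List (Int × Int × Int) :=
  match pvLoopA label_column dataset 0 PySem.Dict.empty none 0 with
  | (b, some c, s) => (b.insert c (s, (dataset.length : Int))).items
  | (b, none, _) => b.items

-- ===== PORT B =====
-- the inner while loop: number of further consecutive elements equal to l
def pvRunB (l : Int) : List Int → Nat
  | [] => 0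
  | x :: xs => if x == l then pvRunB l xs + 1 else 0

-- the outer while loop: i is the run start index, the run end is i + 1 + k
def pvLoopB : List Int → Int → PySem.Dict Int (Int × Int) → PySem.Dict Int (Int × Int)
  | [], _, b => b
  | l :: rest, i, b =>
    let k := pvRunB l rest
    pvLoopB (rest.drop k) (i + 1 + (k : Int)) (b.insert l (i, i + 1 + (k : Int)))
termination_by ls => ls.length
decreasing_by simp only [List.length_drop, List.length_cons]; omega

def get_label_boundaries_alt (dataset : List (List (String × Int))) (label_column : String) : List (Int × Int × Int) :=
  let labels := dataset.map (fun ex => (pvLookup ex label_column).getD 0)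
  (pvLoopB labels 0 PySem.Dict.empty).items

-- ===== PRECONDITION & SPEC =====
-- Pre_ excludes exactly the inputs where Python A raises KeyError: a row without the label_column key.
def Pre_get_label_boundaries (dataset : List (List (String × Int))) (label_column : String) : Prop :=
  ∀ row ∈ dataset, label_column ∈ row.map Prod.fst
instance (dataset : List (List (String × Int))) (label_column : String) : Decidable (Pre_get_label_boundaries dataset label_column) := by unfold Pre_get_label_boundaries; infer_instance

def pvWitness_get_label_boundaries : (List (List (String × Int))) × String :=
  ([[("label", 1)], [("label", 2)], [("label", 2)]], "label")

def Spec_get_label_boundaries (dataset : List (List (String × Int))) (label_column : String) (out : List (Int × Int × Int)) : Prop := out = get_label_boundaries_alt dataset label_column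
instance (dataset : List (List (String × Int))) (label_column : String) (out : List (Int × Int × Int)) : Decidable (Spec_get_label_boundaries dataset label_column out) := by unfold Spec_get_label_boundaries; infer_instance

-- ===== CLAIM (what is proved, stated in full; the proofs are below) =====
def Claim_equal_get_label_boundaries : Prop := ∀ (dataset : List (List (String × Int))) (label_column : String), Dom_get_label_boundaries dataset label_column → Pre_get_label_boundaries dataset label_column → Spec_get_label_boundaries dataset label_column (get_label_boundaries dataset label_column)

-- ===== LEMMAS AND PROOFS =====

-- unfolding equations for the well-founded recursion pvLoopB
lemma pvLoopB_nil (i : Int) (b : PySem.Dict Int (Int × Int)) : pvLoopB [] i b = b := by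
  rw [pvLoopB.eq_def]

lemma pvLoopB_cons (l : Int) (rest : List Int) (i : Int) (b : PySem.Dict Int (Int × Int)) :
    pvLoopB (l :: rest) i b =
      pvLoopB (rest.drop (pvRunB l rest)) (i + 1 + (pvRunB l rest : Int))
        (b.insert l (i, i + 1 + (pvRunB l rest : Int))) := by
  rw [pvLoopB.eq_def]

-- A's loop followed by its post-loop insert, as one function (idx + rows.length = len(dataset))
def pvFinishA (label_column : String) (rows : List (List (String × Int))) (idx : Int)
    (b : PySem.Dict Int (Int × Int)) (cur : Option Int) (s : Int) : PySem.Dict Int (Int × Int) :=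
  match pvLoopA label_column rows idx b cur s with
  | (b', some c, s') => b'.insert c (s', idx + (rows.length : Int))
  | (b', none, _) => b'

-- key invariant: from state (some c, s) A finishes like B does after merging the
-- pending run of c (of further length k = pvRunB c labels) into one insert
lemma pvFinishA_eq_loopB (label_column : String) :
    ∀ (rows : List (List (String × Int))) (c s idx : Int) (b : PySem.Dict Int (Int × Int)),
    pvFinishA label_column rows idx b (some c) s =
      pvLoopB ((rows.map (fun ex => (pvLookup ex label_column).getD 0)).drop
                 (pvRunB c (rows.map (fun ex => (pvLookup ex label_column).getD 0))))
        (idx + (pvRunB c (rows.map (fun ex => (pvLookup ex label_column).getD 0)) : Int))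
        (b.insert c (s, idx + (pvRunB c (rows.map (fun ex => (pvLookup ex label_column).getD 0)) : Int))) := by
  intro rows
  induction rows with
  | nil =>
    intro c s idx b
    simp [pvFinishA, pvLoopA, pvRunB, pvLoopB_nil]
  | cons ex rest ih =>
    intro c s idx b
    by_cases h : (pvLookup ex label_column).getD 0 = c
    · -- same label: the run continues
      have hstep : pvLoopA label_column (ex :: rest) idx b (some c) s
          = pvLoopA label_column rest (idx + 1) b (some c) s := by
        simp [pvLoopA, h]
      have hA : pvFinishA label_column (ex :: rest) idx b (some c) s
          = pvFinishA label_column rest (idx + 1) b (some c) s := by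
        unfold pvFinishA
        rw [hstep]
        rcases hr : pvLoopA label_column rest (idx + 1) b (some c) s with ⟨b', cur', s'⟩
        cases cur' <;> simp
        ring_nf
      rw [hA, ih c s (idx + 1) b]
      have hk : pvRunB c ((ex :: rest).map (fun ex => (pvLookup ex label_column).getD 0))
          = pvRunB c (rest.map (fun ex => (pvLookup ex label_column).getD 0)) + 1 := by
        simp [pvRunB, h]
      rw [hk]
      have hd : ((ex :: rest).map (fun ex => (pvLookup ex label_column).getD 0)).drop
            (pvRunB c (rest.map (fun ex => (pvLookup ex label_column).getD 0)) + 1)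
          = (rest.map (fun ex => (pvLookup ex label_column).getD 0)).drop
            (pvRunB c (rest.map (fun ex => (pvLookup ex label_column).getD 0))) := by
        simp
      rw [hd]
      have he : idx + ((pvRunB c (rest.map (fun ex => (pvLookup ex label_column).getD 0)) + 1 : Nat) : Int)
          = idx + 1 + (pvRunB c (rest.map (fun ex => (pvLookup ex label_column).getD 0)) : Int) := by
        push_cast; ring
      rw [he]
    · -- label change: A inserts (s, idx) for c and restarts; B's pvRunB c here is 0
      have hstep : pvLoopA label_column (ex :: rest) idx b (some c) s
          = pvLoopA label_column rest (idx + 1) (b.insert c (s, idx))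
              (some ((pvLookup ex label_column).getD 0)) idx := by
        simp [pvLoopA, h]
      have hA : pvFinishA label_column (ex :: rest) idx b (some c) s
          = pvFinishA label_column rest (idx + 1) (b.insert c (s, idx))
              (some ((pvLookup ex label_column).getD 0)) idx := by
        unfold pvFinishA
        rw [hstep]
        rcases hr : pvLoopA label_column rest (idx + 1) (b.insert c (s, idx))
            (some ((pvLookup ex label_column).getD 0)) idx with ⟨b', cur', s'⟩
        cases cur' <;> simp
        ring_nf
      rw [hA, ih ((pvLookup ex label_column).getD 0) idx (idx + 1) (b.insert c (s, idx))]
      have h0 : pvRunB c ((ex :: rest).map (fun ex => (pvLookup ex label_column).getD 0)) = 0 := by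
        simp [pvRunB, h]
      rw [h0]
      have hc : ((ex :: rest).map (fun ex => (pvLookup ex label_column).getD 0)).drop 0
          = (pvLookup ex label_column).getD 0 :: rest.map (fun ex => (pvLookup ex label_column).getD 0) := by
        simp
      rw [hc, pvLoopB_cons]
      simp

-- the port's top-level match equals pvFinishA at the initial state
lemma get_label_boundaries_eq_finishA (dataset : List (List (String × Int))) (label_column : String) :
    get_label_boundaries dataset label_column = (pvFinishA label_column dataset 0 PySem.Dict.empty none 0).items := by
  unfold get_label_boundaries pvFinishA
  rcases hr : pvLoopA label_column dataset 0 PySem.Dict.empty none 0 with ⟨b', cur', s'⟩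
  cases cur' <;> simp

-- ===== VERDICT (by name: the statement is the Claim_ definition above) =====
theorem get_label_boundaries_spec : Claim_equal_get_label_boundaries := by
  intro dataset label_column _ _
  unfold Spec_get_label_boundaries
  rw [get_label_boundaries_eq_finishA]
  cases dataset with
  | nil => simp [pvFinishA, pvLoopA, get_label_boundaries_alt, pvLoopB_nil]
  | cons ex rest =>
    have hstep : pvLoopA label_column (ex :: rest) 0 PySem.Dict.empty none 0
        = pvLoopA label_column rest 1 PySem.Dict.empty
            (some ((pvLookup ex label_column).getD 0)) 0 := by
      simp [pvLoopA]
    have h1 : pvFinishA label_column (ex :: rest) 0 PySem.Dict.empty none 0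
        = pvFinishA label_column rest 1 PySem.Dict.empty
            (some ((pvLookup ex label_column).getD 0)) 0 := by
      unfold pvFinishA
      rw [hstep]
      rcases hr : pvLoopA label_column rest 1 PySem.Dict.empty
          (some ((pvLookup ex label_column).getD 0)) 0 with ⟨b', cur', s'⟩
      cases cur' <;> simp
      ring_nf
    rw [h1, pvFinishA_eq_loopB]
    show _ = get_label_boundaries_alt (ex :: rest) label_column
    unfold get_label_boundaries_alt
    simp only [List.map_cons]
    rw [pvLoopB_cons]
    simp
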